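-- pv_equiv track=rewrite | github.com/CodingSinger/algorithm | leetcode/665.py | helper
-- ===== SOURCE A (Python) =====
-- def helper(nums):
--
--     for i,num in enumerate(nums[:-1]):
--         if i == 0 or (nums[i]>nums[i-1] and nums[i]>nums[i+1]):
--             new = nums[:i]+nums[i+1:]
--         elif nums[i]<nums[i-1] and nums[i]<nums[i+1]:
--             new = nums[:i]+nums[i+1:]
--         else:
--             continue
--
--         sl = sorted(new)
--         if  sl == new:
--             return True
--
--     return len(nums) == 1 or nums[:-1] == sorted(nums[:-1])
-- ===== SOURCE B (Python) =====
-- def helper(nums):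
--     # One-pass: find the first descent and the longest sorted suffix,
--     # then test the only two viable deletions in O(1).
--     n = len(nums)
--     if n <= 2:
--         return True
--     p = 0
--     while p + 1 < n and nums[p] <= nums[p + 1]:
--         p += 1
--     if p == n - 1:
--         return True
--     s = n - 1
--     while s >= 1 and nums[s - 1] <= nums[s]:
--         s -= 1
--     drop_right = s <= p + 2 and (p + 2 == n or nums[p] <= nums[p + 2])
--     drop_left = s <= p + 1 and (p == 0 or nums[p - 1] <= nums[p + 1])
--     return drop_right or drop_left
-- ===== Notes on version B (the rewrite author's own statement) =====
-- stated objective: faster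
-- what changed: Instead of trying candidate deletions and sorting each candidate copy, B locates the first descent and the longest sorted suffix in one linear scan and decides the only two viable deletions with O(1) comparisons.
import Mathlib
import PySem

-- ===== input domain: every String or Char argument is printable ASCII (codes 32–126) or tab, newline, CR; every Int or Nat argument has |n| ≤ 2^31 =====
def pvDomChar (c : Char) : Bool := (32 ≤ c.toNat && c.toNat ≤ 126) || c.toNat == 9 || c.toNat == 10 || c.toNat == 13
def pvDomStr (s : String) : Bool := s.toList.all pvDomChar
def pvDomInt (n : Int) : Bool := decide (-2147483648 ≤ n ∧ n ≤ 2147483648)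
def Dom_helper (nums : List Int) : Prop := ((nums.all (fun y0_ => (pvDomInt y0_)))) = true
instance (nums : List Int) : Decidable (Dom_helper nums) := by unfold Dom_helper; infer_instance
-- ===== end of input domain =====

-- B replaces A's candidate-deletion-plus-sort scan by a single linear scan (first descent + longest
-- sorted suffix) and O(1) tests of the two viable deletions; objective: faster.

-- ===== PORT A =====
-- B replaces A's candidate-deletion-plus-sort scan by one linear scan (first descent + longest
-- sorted suffix) and O(1) tests of the two viable deletions; objective: faster.

-- the for-loop over enumerate(nums[:-1]) with its early returns
def helperGo (nums : List Int) : List (Int × Int) → Bool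
  | [] =>
      (nums.length == 1) ||
        (PySem.List.slice nums none (some (-1)) ==
          PySem.List.sorted (PySem.List.slice nums none (some (-1))) (fun x => x))
  | (i, _num) :: rest =>
      if (i == 0) || (decide (PySem.List.pyGetD nums i 0 > PySem.List.pyGetD nums (i - 1) 0) &&
            decide (PySem.List.pyGetD nums i 0 > PySem.List.pyGetD nums (i + 1) 0)) then
        let new := PySem.List.slice nums none (some i) ++ PySem.List.slice nums (some (i + 1)) none
        if PySem.List.sorted new (fun x => x) == new then true else helperGo nums rest
      else if decide (PySem.List.pyGetD nums i 0 < PySem.List.pyGetD nums (i - 1) 0) &&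
            decide (PySem.List.pyGetD nums i 0 < PySem.List.pyGetD nums (i + 1) 0) then
        let new := PySem.List.slice nums none (some i) ++ PySem.List.slice nums (some (i + 1)) none
        if PySem.List.sorted new (fun x => x) == new then true else helperGo nums rest
      else helperGo nums rest

def helper (nums : List Int) : Bool :=
  helperGo nums (PySem.List.enumerate (PySem.List.slice nums none (some (-1))) 0)


-- ===== PORT B =====
-- loop indices are provably in range, so List.getD transcribes Python's nums[i] exactly here
def altP (nums : List Int) (p : Nat) : Nat :=
  if h : p + 1 < nums.length ∧ List.getD nums p 0 ≤ List.getD nums (p + 1) 0 then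
    altP nums (p + 1)
  else p
termination_by nums.length - p
decreasing_by omega

def altS (nums : List Int) (s : Nat) : Nat :=
  if h : 1 ≤ s ∧ List.getD nums (s - 1) 0 ≤ List.getD nums s 0 then
    altS nums (s - 1)
  else s
termination_by s

def helper_alt (nums : List Int) : Bool :=
  let n := nums.length
  if n ≤ 2 then true
  else
    let p := altP nums 0
    if p = n - 1 then true
    else
      let s := altS nums (n - 1)
      let dropRight := decide (s ≤ p + 2) &&
        (decide (p + 2 = n) || decide (List.getD nums p 0 ≤ List.getD nums (p + 2) 0))
      let dropLeft := decide (s ≤ p + 1) &&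
        (decide (p = 0) || decide (List.getD nums (p - 1) 0 ≤ List.getD nums (p + 1) 0))
      dropRight || dropLeft


-- ===== PRECONDITION & SPEC =====
def Spec_helper (nums : List Int) (out : Bool) : Prop := out = helper_alt nums
instance (nums : List Int) (out : Bool) : Decidable (Spec_helper nums out) := by unfold Spec_helper; infer_instance

-- ===== CLAIM (what is proved, stated in full; the proofs are below) =====
def Claim_equal_helper : Prop := ∀ (nums : List Int), Dom_helper nums → Spec_helper nums (helper nums)

-- ===== LEMMAS AND PROOFS =====
def pvND (l : List Int) : Prop := ∀ k, k + 1 < l.length → List.getD l k 0 ≤ List.getD l (k + 1) 0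

theorem pvND_mono (l : List Int) (h : pvND l) :
    ∀ i j, i ≤ j → j < l.length → List.getD l i 0 ≤ List.getD l j 0 := by
  intro i j hij hj
  induction j, hij using Nat.le_induction with
  | base => exact le_refl _
  | succ j hij ih =>
      exact le_trans (ih (by omega)) (h j hj)

theorem pvND_iff_pairwise (l : List Int) : pvND l ↔ l.Pairwise (· ≤ ·) := by
  constructor
  · intro h
    rw [List.pairwise_iff_getElem]
    intro i j hi hj hij
    have := pvND_mono l h i j (le_of_lt hij) hj
    rw [List.getD_eq_getElem?_getD, List.getD_eq_getElem?_getD,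
      List.getElem?_eq_getElem hi, List.getElem?_eq_getElem hj] at this
    simpa using this
  · intro h k hk
    have := List.pairwise_iff_getElem.mp h k (k + 1) (by omega) hk (by omega)
    rw [List.getD_eq_getElem?_getD, List.getD_eq_getElem?_getD,
      List.getElem?_eq_getElem (by omega : k < l.length), List.getElem?_eq_getElem hk] at *
    simpa using this

theorem pv_sorted_beq (l : List Int) :
    (PySem.List.sorted l (fun x => x) == l) = true ↔ pvND l := by
  rw [beq_iff_eq, pvND_iff_pairwise]
  constructor
  · intro h
    have := PySem.List.sorted_pairwise l (fun x => x)
    rw [h] at this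
    simpa using this
  · intro h
    exact PySem.List.sorted_eq_self_of_pairwise l (fun x => x) (by simpa using h)

theorem pv_getD_erase (l : List Int) (j k : Nat) :
    List.getD (l.eraseIdx j) k 0 = if k < j then List.getD l k 0 else List.getD l (k + 1) 0 := by
  rw [List.getD_eq_getElem?_getD, List.getElem?_eraseIdx]
  split <;> rw [List.getD_eq_getElem?_getD]

theorem pv_del_iff (l : List Int) (j : Nat) (hj : j < l.length) :
    pvND (l.eraseIdx j) ↔
      ((∀ k, k + 1 < l.length → k ≠ j → k + 1 ≠ j → List.getD l k 0 ≤ List.getD l (k + 1) 0) ∧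
        (0 < j → j + 1 < l.length → List.getD l (j - 1) 0 ≤ List.getD l (j + 1) 0)) := by
  have hlen : (l.eraseIdx j).length = l.length - 1 := by
    rw [List.length_eraseIdx]; simp [hj]
  constructor
  · intro h
    constructor
    · intro k hk hkj hk1j
      rcases Nat.lt_or_ge (k + 1) j with hlt | hge
      · have := h k (by omega)
        rw [pv_getD_erase, pv_getD_erase] at this
        simpa [show k < j by omega, hlt] using this
      · have hkgt : j < k := by omega
        have := h (k - 1) (by omega)
        rw [pv_getD_erase, pv_getD_erase] at this
        rw [if_neg (by omega), if_neg (by omega)] at this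
        have e1 : k - 1 + 1 = k := by omega
        rwa [e1] at this
    · intro h0 hj1
      have := h (j - 1) (by omega)
      rw [pv_getD_erase, pv_getD_erase] at this
      rw [if_pos (by omega), if_neg (by omega)] at this
      have e : j - 1 + 1 = j := by omega
      rwa [e] at this
  · rintro ⟨h1, h2⟩ k hk
    rw [hlen] at hk
    rw [pv_getD_erase, pv_getD_erase]
    by_cases hkj : k + 1 < j
    · rw [if_pos (by omega), if_pos hkj]
      exact h1 k (by omega) (by omega) (by omega)
    · by_cases hkj2 : k < j
      · -- k + 1 = j
        have : k + 1 = j := by omega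
        rw [if_pos hkj2, if_neg (by omega)]
        have := h2 (by omega) (by omega)
        have e : j - 1 = k := by omega
        rw [e] at this
        have e2 : k + 1 + 1 = j + 1 := by omega
        rwa [← e2] at this
      · rw [if_neg hkj2, if_neg (by omega)]
        exact h1 (k + 1) (by omega) (by omega) (by omega)

def pvHitB (nums : List Int) (i : Int) : Bool :=
  (((i == 0) || (decide (PySem.List.pyGetD nums i 0 > PySem.List.pyGetD nums (i - 1) 0) &&
        decide (PySem.List.pyGetD nums i 0 > PySem.List.pyGetD nums (i + 1) 0))) ||
      (decide (PySem.List.pyGetD nums i 0 < PySem.List.pyGetD nums (i - 1) 0) &&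
        decide (PySem.List.pyGetD nums i 0 < PySem.List.pyGetD nums (i + 1) 0))) &&
    (PySem.List.sorted (PySem.List.slice nums none (some i) ++ PySem.List.slice nums (some (i + 1)) none)
        (fun x => x) ==
      PySem.List.slice nums none (some i) ++ PySem.List.slice nums (some (i + 1)) none)

def pvBase (nums : List Int) : Bool :=
  (nums.length == 1) ||
    (PySem.List.slice nums none (some (-1)) ==
      PySem.List.sorted (PySem.List.slice nums none (some (-1))) (fun x => x))

theorem pv_ite_shape (c1 c2 chk rec : Bool) :
    (if c1 then (if chk then true else rec) else if c2 then (if chk then true else rec) else rec) = true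
      ↔ ((c1 || c2) && chk) = true ∨ rec = true := by
  cases c1 <;> cases c2 <;> cases chk <;> cases rec <;> simp

theorem helperGo_cons (nums : List Int) (i x : Int) (rest : List (Int × Int)) :
    helperGo nums ((i, x) :: rest) = true ↔
      pvHitB nums i = true ∨ helperGo nums rest = true := by
  simp only [helperGo, pvHitB]
  exact pv_ite_shape _ _ _ _

theorem helperGo_iff (nums : List Int) (L : List (Int × Int)) :
    helperGo nums L = true ↔ (∃ p ∈ L, pvHitB nums p.1 = true) ∨ pvBase nums = true := by
  induction L with
  | nil => simp [helperGo, pvBase]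
  | cons p rest ih =>
      obtain ⟨i, x⟩ := p
      rw [helperGo_cons, ih]
      simp only [List.mem_cons]
      constructor
      · rintro (h | ⟨q, hq, hh⟩ | hb)
        · exact Or.inl ⟨(i, x), Or.inl rfl, h⟩
        · exact Or.inl ⟨q, Or.inr hq, hh⟩
        · exact Or.inr hb
      · rintro (⟨q, (rfl | hq), hh⟩ | hb)
        · exact Or.inl hh
        · exact Or.inr (Or.inl ⟨q, hq, hh⟩)
        · exact Or.inr (Or.inr hb)

def pvCondP (nums : List Int) (k : Nat) : Prop :=
  k = 0 ∨
    (List.getD nums (k - 1) 0 < List.getD nums k 0 ∧ List.getD nums (k + 1) 0 < List.getD nums k 0) ∨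
    (List.getD nums k 0 < List.getD nums (k - 1) 0 ∧ List.getD nums k 0 < List.getD nums (k + 1) 0)

theorem pvHitB_iff (nums : List Int) (k : Nat) :
    pvHitB nums (k : Int) = true ↔ pvCondP nums k ∧ pvND (nums.eraseIdx k) := by
  have hnew : PySem.List.slice nums none (some (k : Int)) ++
      PySem.List.slice nums (some ((k : Int) + 1)) none = nums.eraseIdx k := by
    have e : ((k : Int) + 1) = (((k + 1 : Nat)) : Int) := by push_cast; ring
    rw [PySem.List.slice_to_natCast, e, PySem.List.slice_from_natCast,
      ← List.eraseIdx_eq_take_drop_succ]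
  rw [pvHitB, hnew, Bool.and_eq_true, pv_sorted_beq]
  constructor
  · rintro ⟨hc, hnd⟩
    refine ⟨?_, hnd⟩
    by_cases hk0 : k = 0
    · exact Or.inl hk0
    · have e1 : (k : Int) - 1 = ((k - 1 : Nat) : Int) := by omega
      have e2 : (k : Int) + 1 = ((k + 1 : Nat) : Int) := by push_cast; ring
      rw [e1, e2] at hc
      simp only [PySem.List.pyGetD_natCast, Bool.or_eq_true, Bool.and_eq_true, beq_iff_eq,
        decide_eq_true_eq] at hc
      rcases hc with ((h0 | h) | h)
      · exact absurd (by exact_mod_cast h0) hk0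
      · exact Or.inr (Or.inl ⟨h.1, h.2⟩)
      · exact Or.inr (Or.inr ⟨h.1, h.2⟩)
  · rintro ⟨hc, hnd⟩
    refine ⟨?_, hnd⟩
    rcases hc with hk0 | hc
    · subst hk0; simp
    · have hk0 : k ≠ 0 := by
        rcases hc with ⟨h1, _⟩ | ⟨h1, _⟩ <;>
          · intro h; rw [h] at h1; simp at h1
      have e1 : (k : Int) - 1 = ((k - 1 : Nat) : Int) := by omega
      have e2 : (k : Int) + 1 = ((k + 1 : Nat) : Int) := by push_cast; ring
      rw [e1, e2]
      simp only [PySem.List.pyGetD_natCast, Bool.or_eq_true, Bool.and_eq_true, beq_iff_eq,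
        decide_eq_true_eq]
      rcases hc with h | h
      · exact Or.inl (Or.inr ⟨h.1, h.2⟩)
      · exact Or.inr ⟨h.1, h.2⟩

theorem pv_rev_sorted_beq (l : List Int) :
    (l == PySem.List.sorted l (fun x => x)) = true ↔ pvND l := by
  have h := pv_sorted_beq l
  rw [beq_iff_eq] at h ⊢
  exact ⟨fun hh => h.mp hh.symm, fun hh => (h.mpr hh).symm⟩

theorem pvBase_iff (nums : List Int) :
    pvBase nums = true ↔ nums.length = 1 ∨ pvND nums.dropLast := by
  rw [pvBase, Bool.or_eq_true, PySem.List.slice_to_neg_one, pv_rev_sorted_beq, beq_iff_eq]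

def pvGood (nums : List Int) : Prop := nums = [] ∨ ∃ j < nums.length, pvND (nums.eraseIdx j)

theorem pvND_short (l : List Int) (h : l.length ≤ 1) : pvND l := by
  intro k hk; omega

theorem pvA_iff (nums : List Int) : helper nums = true ↔ pvGood nums := by
  rw [helper, PySem.List.slice_to_neg_one, helperGo_iff]
  have hmem : (∃ p ∈ PySem.List.enumerate nums.dropLast 0, pvHitB nums p.1 = true) ↔
      ∃ k, k + 1 < nums.length ∧ pvCondP nums k ∧ pvND (nums.eraseIdx k) := by
    constructor
    · rintro ⟨p, hp, hh⟩
      rw [PySem.List.mem_enumerate_iff] at hp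
      obtain ⟨k, hk, rfl⟩ := hp
      rw [List.length_dropLast] at hk
      simp only [zero_add] at hh
      exact ⟨k, by omega, (pvHitB_iff nums k).mp hh⟩
    · rintro ⟨k, hk, hh⟩
      refine ⟨((k : Int), nums.dropLast[k]'(by rw [List.length_dropLast]; omega)), ?_, ?_⟩
      · rw [PySem.List.mem_enumerate_iff]
        exact ⟨k, by rw [List.length_dropLast]; omega, by simp⟩
      · exact (pvHitB_iff nums k).mpr hh
  rw [hmem, pvBase_iff]
  constructor
  · rintro (⟨k, hk, _, hnd⟩ | h1 | hdl)
    · exact Or.inr ⟨k, by omega, hnd⟩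
    · refine Or.inr ⟨0, by omega, pvND_short _ ?_⟩
      simp [h1]
    · rcases eq_or_ne nums [] with rfl | hne
      · exact Or.inl rfl
      · have hl : 0 < nums.length := List.length_pos_of_ne_nil hne
        refine Or.inr ⟨nums.length - 1, by omega, ?_⟩
        have hE : nums.dropLast = nums.eraseIdx (nums.length - 1) :=
          List.dropLast_eq_eraseIdx (by omega)
        rw [← hE]
        exact hdl
  · rintro (rfl | ⟨j, hj, hdel⟩)
    · right; right; intro k hk; simp at hk
    · by_cases hn1 : nums.length = 1
      · exact Or.inr (Or.inl hn1)
      · by_cases hjl : j = nums.length - 1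
        · refine Or.inr (Or.inr ?_)
          have hE : nums.dropLast = nums.eraseIdx j := List.dropLast_eq_eraseIdx (by omega)
          rw [hE]
          exact hdel
        · by_cases hc : pvCondP nums j
          · exact Or.inl ⟨j, by omega, hc, hdel⟩
          · obtain ⟨h1, h2⟩ := (pv_del_iff nums j hj).mp hdel
            rw [pvCondP] at hc
            push_neg at hc
            obtain ⟨hj0, hmx, hmn⟩ := hc
            have hbc := h2 (by omega) (by omega)
            have hba : List.getD nums (j - 1) 0 ≤ List.getD nums j 0 ∧
                List.getD nums j 0 ≤ List.getD nums (j + 1) 0 := by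
              constructor <;> omega
            have hnd : pvND nums := by
              intro k hk
              rcases eq_or_ne (k + 1) j with he | hne1
              · have hkj : k = j - 1 := by omega
                rw [hkj, (by omega : j - 1 + 1 = j)]
                exact hba.1
              · rcases eq_or_ne k j with he2 | hne2
                · rw [he2]; exact hba.2
                · exact h1 k hk hne2 hne1
            refine Or.inl ⟨0, by omega, Or.inl rfl, ?_⟩
            exact (pv_del_iff nums 0 (by omega)).mpr
              ⟨fun k hk _ _ => hnd k hk, fun h0 => absurd h0 (by omega)⟩

theorem pvAltP_spec (nums : List Int) :
    ∀ m q, nums.length - q ≤ m →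
      q ≤ altP nums q ∧
      (∀ k, q ≤ k → k < altP nums q → List.getD nums k 0 ≤ List.getD nums (k + 1) 0) ∧
      (altP nums q + 1 < nums.length →
        List.getD nums (altP nums q + 1) 0 < List.getD nums (altP nums q) 0) ∧
      (q < nums.length → altP nums q < nums.length) := by
  intro m
  induction m with
  | zero =>
      intro q hq
      rw [altP, dif_neg (by omega)]
      exact ⟨le_refl q, fun k h1 h2 => absurd h2 (by omega), fun h => absurd h (by omega),
        fun h => absurd h (by omega)⟩
  | succ m ih =>
      intro q hq
      rw [altP]
      by_cases h : q + 1 < nums.length ∧ List.getD nums q 0 ≤ List.getD nums (q + 1) 0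
      · rw [dif_pos h]
        obtain ⟨ha, hb, hc, hd⟩ := ih (q + 1) (by omega)
        refine ⟨by omega, ?_, hc, fun _ => hd h.1⟩
        intro k h1 h2
        rcases eq_or_ne k q with rfl | hne
        · exact h.2
        · exact hb k (by omega) h2
      · rw [dif_neg h]
        refine ⟨le_refl q, fun k h1 h2 => absurd h2 (by omega), ?_, fun hql => hql⟩
        intro hq1
        omega

theorem pvAltS_spec (nums : List Int) :
    ∀ q, altS nums q ≤ q ∧
      (∀ k, altS nums q ≤ k → k < q → List.getD nums k 0 ≤ List.getD nums (k + 1) 0) ∧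
      (0 < altS nums q →
        List.getD nums (altS nums q) 0 < List.getD nums (altS nums q - 1) 0) := by
  intro q
  induction q using Nat.strong_induction_on with
  | _ q ih =>
      rw [altS]
      by_cases h : 1 ≤ q ∧ List.getD nums (q - 1) 0 ≤ List.getD nums q 0
      · rw [dif_pos h]
        obtain ⟨ha, hb, hc⟩ := ih (q - 1) (by omega)
        refine ⟨by omega, ?_, hc⟩
        intro k h1 h2
        rcases eq_or_ne k (q - 1) with rfl | hne
        · rw [(by omega : q - 1 + 1 = q)]
          exact h.2
        · exact hb k h1 (by omega)
      · rw [dif_neg h]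
        refine ⟨le_refl q, fun k h1 h2 => absurd h2 (by omega), ?_⟩
        intro h0
        omega

theorem pvB_iff (nums : List Int) : helper_alt nums = true ↔ pvGood nums := by
  simp only [helper_alt]
  by_cases hn2 : nums.length ≤ 2
  · rw [if_pos hn2]
    simp only [true_iff]
    rcases nums with _ | ⟨x, rest⟩
    · exact Or.inl rfl
    · refine Or.inr ⟨0, by simp, ?_⟩
      rw [List.eraseIdx_cons_zero]
      exact pvND_short rest (by simp only [List.length_cons] at hn2; omega)
  · rw [if_neg hn2]
    have hn3 : 3 ≤ nums.length := by omega
    obtain ⟨_, hpre, hpdesc, hplen'⟩ := pvAltP_spec nums nums.length 0 (by omega)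
    have hplen : altP nums 0 < nums.length := hplen' (by omega)
    by_cases hpe : altP nums 0 = nums.length - 1
    · rw [if_pos hpe]
      simp only [true_iff]
      have hnd : pvND nums := by
        intro k hk
        exact hpre k (by omega) (by omega)
      refine Or.inr ⟨0, by omega, ?_⟩
      exact (pv_del_iff nums 0 (by omega)).mpr
        ⟨fun k hk _ _ => hnd k hk, fun h0 => absurd h0 (by omega)⟩
    · rw [if_neg hpe]
      set p := altP nums 0 with hp
      have hplt : p + 1 < nums.length := by omega
      have hdesc : List.getD nums (p + 1) 0 < List.getD nums p 0 := hpdesc hplt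
      obtain ⟨hsle, hsuf, hsdesc⟩ := pvAltS_spec nums (nums.length - 1)
      set s := altS nums (nums.length - 1) with hs
      have hsge : ∀ t, (∀ k, t ≤ k → k + 1 < nums.length →
          List.getD nums k 0 ≤ List.getD nums (k + 1) 0) → s ≤ t := by
        intro t hsorted
        by_contra hlt
        have h1 : 0 < s := by omega
        have h2 := hsorted (s - 1) (by omega) (by omega)
        have h3 := hsdesc h1
        rw [(by omega : s - 1 + 1 = s)] at h2
        omega
      have hsuf' : ∀ k, s ≤ k → k + 1 < nums.length →
          List.getD nums k 0 ≤ List.getD nums (k + 1) 0 := by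
        intro k h1 h2
        exact hsuf k h1 (by omega)
      simp only [Bool.or_eq_true, Bool.and_eq_true, decide_eq_true_eq]
      constructor
      · rintro (⟨hsp, hbr⟩ | ⟨hsp, hbr⟩)
        · refine Or.inr ⟨p + 1, by omega, ?_⟩
          refine (pv_del_iff nums (p + 1) (by omega)).mpr ⟨?_, ?_⟩
          · intro k hk hk1 hk2
            rcases Nat.lt_or_ge k (p + 1) with hlt | hge
            · exact hpre k (by omega) (by omega)
            · exact hsuf' k (by omega) hk
          · intro _ hb2
            rcases hbr with he | hle
            · omega
            · rw [(by omega : p + 1 - 1 = p)]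
              exact hle
        · refine Or.inr ⟨p, by omega, ?_⟩
          refine (pv_del_iff nums p (by omega)).mpr ⟨?_, ?_⟩
          · intro k hk hk1 hk2
            rcases Nat.lt_or_ge k p with hlt | hge
            · exact hpre k (by omega) (by omega)
            · exact hsuf' k (by omega) hk
          · intro hp0 hb2
            rcases hbr with he | hle
            · omega
            · exact hle
      · rintro (rfl | ⟨j, hj, hdel⟩)
        · simp at hn3
        · have hcand : j = p ∨ j = p + 1 := by
            by_contra hne
            push_neg at hne
            obtain ⟨g1, g2⟩ := (pv_del_iff nums j (by omega)).mp hdel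
            have := g1 p (by omega) (by omega) (by omega)
            omega
          obtain ⟨g1, g2⟩ := (pv_del_iff nums j (by omega)).mp hdel
          rcases hcand with rfl | rfl
          · refine Or.inr ⟨?_, ?_⟩
            · refine hsge (p + 1) ?_
              intro k h1 h2
              exact g1 k h2 (by omega) (by omega)
            · rcases Nat.eq_zero_or_pos p with h0 | h0
              · exact Or.inl h0
              · exact Or.inr (g2 h0 hplt)
          · refine Or.inl ⟨?_, ?_⟩
            · rcases Nat.lt_or_ge (p + 2) nums.length with hlt | hge
              · refine hsge (p + 2) ?_
                intro k h1 h2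
                exact g1 k h2 (by omega) (by omega)
              · omega
            · rcases Nat.lt_or_ge (p + 2) nums.length with hlt | hge
              · have hbr := g2 (by omega) (by omega)
                rw [(by omega : p + 1 - 1 = p)] at hbr
                exact Or.inr hbr
              · exact Or.inl (by omega)

-- ===== VERDICT (by name: the statement is the Claim_ definition above) =====
theorem helper_spec : Claim_equal_helper := by
  intro nums _
  unfold Spec_helper
  exact Bool.eq_iff_iff.mpr ((pvA_iff nums).trans (pvB_iff nums).symm)
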